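-- pv_equiv track=rewrite | github.com/ConferInc/USDA-Mapping-agent | utils/data_loader.py | _extract_ingredient_from_object
-- ===== SOURCE A (Python) =====
-- from typing import List, Optional
--
-- def _extract_ingredient_from_object(obj: dict) -> Optional[str]:
--     """
--     Extract ingredient name from object.
--     Looks for 'ingredient', 'name', 'food', or 'item' field.
--
--     Args:
--         obj: Dictionary object
--
--     Returns:
--         Ingredient name or None
--     """
--     if not isinstance(obj, dict):
--         return None
--
--     # Try common field names (case-insensitive)
--     for field in ['ingredient', 'name', 'food', 'item', 'ingredients']:
--         for key in obj.keys():
--             if key.lower() == field.lower():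
--                 value = obj[key]
--                 if value and isinstance(value, str):
--                     return value.strip()
--
--     return None
-- ===== SOURCE B (Python) =====
-- def _extract_ingredient_from_object(obj):
--     if not isinstance(obj, dict):
--         return None
--     priority = ['ingredient', 'name', 'food', 'item', 'ingredients']
--     index = {}
--     for key, value in obj.items():
--         kl = key.lower()
--         if kl in index:
--             continue
--         if kl in priority and value and isinstance(value, str):
--             index[kl] = value.strip()
--     for field in priority:
--         if field in index:
--             return index[field]
--     return None
-- ===== Notes on version B (the rewrite author's own statement) =====
-- stated objective: alternative
-- what changed: Replaces A's five field-by-field rescans of the dict with a single pass that builds a first-wins lowercase index and then one lookup per priority field.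
import Mathlib
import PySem

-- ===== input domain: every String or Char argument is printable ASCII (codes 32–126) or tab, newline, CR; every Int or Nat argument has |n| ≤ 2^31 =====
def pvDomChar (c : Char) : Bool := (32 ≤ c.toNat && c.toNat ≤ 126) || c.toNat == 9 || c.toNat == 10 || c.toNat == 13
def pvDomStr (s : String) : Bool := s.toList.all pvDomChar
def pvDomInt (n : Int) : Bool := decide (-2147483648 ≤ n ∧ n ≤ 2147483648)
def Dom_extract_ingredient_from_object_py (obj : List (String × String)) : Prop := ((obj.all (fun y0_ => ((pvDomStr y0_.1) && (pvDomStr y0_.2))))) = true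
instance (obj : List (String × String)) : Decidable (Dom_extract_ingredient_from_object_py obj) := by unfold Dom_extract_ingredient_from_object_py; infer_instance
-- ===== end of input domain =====

-- B replaces A's 5×n nested field-by-field rescans with one pass that builds a
-- first-wins lowercase index dict, then a single priority lookup (objective: alternative/simpler).

-- ===== PORT A =====
-- A's field list (the literal in A's for-statement)
def pvFieldsA : List String := ["ingredient", "name", "food", "item", "ingredients"]

-- A's inner loop: 'for key in obj.keys(): if key.lower() == field.lower(): … if value: return value.strip()'
def pvScanA (field : String) : List (String × String) → Option String
  | [] => none
  | (k, v) :: rest =>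
    if PySem.Str.lower k = PySem.Str.lower field then
      if v ≠ "" then some (PySem.Str.strip v) else pvScanA field rest
    else pvScanA field rest

-- A's outer loop over the field names, returning at the first hit
def pvOuterA : List String → List (String × String) → Option String
  | [], _ => none
  | f :: fs, obj =>
    match pvScanA f obj with
    | some s => some s
    | none => pvOuterA fs obj

def extract_ingredient_from_object_py (obj : List (String × String)) : Option String :=
  pvOuterA pvFieldsA obj

-- ===== PORT B =====
def pvPriorityB : List String := ["ingredient", "name", "food", "item", "ingredients"]

-- B's single pass: first-wins index from lowercased key to stripped value
def pvStepB (idx : PySem.Dict String String) (kv : String × String) : PySem.Dict String String :=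
  if idx.contains (PySem.Str.lower kv.1) then idx
  else if PySem.Str.lower kv.1 ∈ pvPriorityB ∧ kv.2 ≠ "" then idx.insert (PySem.Str.lower kv.1) (PySem.Str.strip kv.2)
  else idx

def pvBuildB (obj : List (String × String)) : PySem.Dict String String :=
  obj.foldl pvStepB PySem.Dict.empty

-- B's final loop: first priority field present in the index
def pvLookupB : List String → PySem.Dict String String → Option String
  | [], _ => none
  | f :: fs, idx =>
    match idx.get? f with
    | some s => some s
    | none => pvLookupB fs idx

def extract_ingredient_from_object_py_alt (obj : List (String × String)) : Option String :=
  pvLookupB pvPriorityB (pvBuildB obj)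

-- ===== PRECONDITION & SPEC =====
def Spec_extract_ingredient_from_object_py (obj : List (String × String)) (out : Option String) : Prop := out = extract_ingredient_from_object_py_alt obj
instance (obj : List (String × String)) (out : Option String) : Decidable (Spec_extract_ingredient_from_object_py obj out) := by unfold Spec_extract_ingredient_from_object_py; infer_instance

-- ===== CLAIM (what is proved, stated in full; the proofs are below) =====
def Claim_equal_extract_ingredient_from_object_py : Prop := ∀ (obj : List (String × String)), Dom_extract_ingredient_from_object_py obj → Spec_extract_ingredient_from_object_py obj (extract_ingredient_from_object_py obj)

-- ===== LEMMAS AND PROOFS =====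

-- Invariant of B's building pass: for an already-lowercase priority field f, the lookup in the
-- finished index is the index's current binding for f, or else A's inner scan of the remaining list.
theorem pvBuild_get (f : String) (hf : PySem.Str.lower f = f) (hmem : f ∈ pvPriorityB) :
    ∀ (obj : List (String × String)) (idx : PySem.Dict String String),
      (obj.foldl pvStepB idx).get? f = (idx.get? f).or (pvScanA f obj) := by
  intro obj
  induction obj with
  | nil => intro idx; simp [pvScanA]
  | cons kv t ih =>
    intro idx
    rcases kv with ⟨k, v⟩
    simp only [List.foldl_cons]
    by_cases hk : PySem.Str.lower k = f
    · by_cases hc : idx.contains (PySem.Str.lower k)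
      · -- key already recorded: index unchanged, and idx.get? f is some, absorbing the scan result
        have hstep : pvStepB idx (k, v) = idx := by simp [pvStepB, hc]
        rw [hstep, ih]
        rw [hk] at hc
        obtain ⟨s, hs⟩ : ∃ s, idx.get? f = some s := by
          have := PySem.Dict.contains_eq_isSome_get? idx f
          rw [hc] at this
          exact Option.isSome_iff_exists.mp this.symm
        simp [pvScanA, hk, hf, hs]
      · by_cases hv : v ≠ ""
        · -- fresh priority key with non-empty value: recorded now
          have hcf : idx.contains f = false := by rw [← hk]; simpa using hc
          have hstep : pvStepB idx (k, v) = idx.insert f (PySem.Str.strip v) := by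
            simp [pvStepB, hk, hcf, hmem, hv]
          have hidx : idx.get? f = none := by
            have := PySem.Dict.contains_eq_isSome_get? idx f
            rw [hcf] at this
            exact Option.not_isSome_iff_eq_none.mp (by simp [← this])
          rw [hstep, ih, PySem.Dict.get?_insert_self, hidx]
          simp [pvScanA, hk, hf, hv]
        · -- empty value: A's scan also skips it
          have hstep : pvStepB idx (k, v) = idx := by simp [pvStepB, hc, hv]
          rw [hstep, ih]
          simp only [ne_eq, not_not] at hv
          simp [pvScanA, hk, hf, hv]
    · -- non-matching key: B may record it under another field; lookup at f unaffected
      have hne : PySem.Str.lower k ≠ f := hk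
      have hstep : (pvStepB idx (k, v)).get? f = idx.get? f := by
        unfold pvStepB
        split_ifs with h1 h2
        · rfl
        · exact PySem.Dict.get?_insert_of_ne idx (PySem.Str.strip v) (Ne.symm hne)
        · rfl
      rw [ih, hstep]
      simp [pvScanA, hk, hf]

-- For each of the five concrete priority fields the scan of obj is the index lookup.
theorem pvBuild_scan (f : String) (hf : PySem.Str.lower f = f) (hmem : f ∈ pvPriorityB)
    (obj : List (String × String)) : (pvBuildB obj).get? f = pvScanA f obj := by
  unfold pvBuildB
  rw [pvBuild_get f hf hmem obj PySem.Dict.empty]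
  simp

-- ===== VERDICT (by name: the statement is the Claim_ definition above) =====
theorem extract_ingredient_from_object_py_spec : Claim_equal_extract_ingredient_from_object_py := by
  intro obj _
  unfold Spec_extract_ingredient_from_object_py
  unfold extract_ingredient_from_object_py extract_ingredient_from_object_py_alt
  have h1 := pvBuild_scan "ingredient" (by decide) (by decide) obj
  have h2 := pvBuild_scan "name" (by decide) (by decide) obj
  have h3 := pvBuild_scan "food" (by decide) (by decide) obj
  have h4 := pvBuild_scan "item" (by decide) (by decide) obj
  have h5 := pvBuild_scan "ingredients" (by decide) (by decide) obj
  show pvOuterA pvFieldsA obj = pvLookupB pvPriorityB (pvBuildB obj)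
  simp only [pvFieldsA, pvPriorityB, pvOuterA, pvLookupB, h1, h2, h3, h4, h5]
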